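-- pv_equiv track=rewrite | github.com/BlakeSearlSonocent/advent-of-piethon-2022 | pie_2023/three/__main__.py | get_part_adjacents
-- ===== SOURCE A (Python) =====
-- from typing import Tuple, Set
--
-- def get_part_adjacents(x: int, y: int, part_value: int, grid) -> Set[Tuple[int, int]]:
--     part_length = len(str(part_value))
--     max_x = len(grid[0]) - 1
--     max_y = len(grid) - 1
--     part_box = set()
--     for dx in range(-1, part_length + 1):
--         for dy in (-1, 0, 1):
--             if 0 <= y + dy <= max_y and 0 <= x + dx <= max_x:
--                 part_box.add((x + dx, y + dy))
--
--     return part_box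
-- ===== SOURCE B (Python) =====
-- def get_part_adjacents(x, y, part_value, grid):
--     x0 = max(0, x - 1)
--     x1 = min(len(grid[0]) - 1, x + len(str(part_value)))
--     y0 = max(0, y - 1)
--     y1 = min(len(grid) - 1, y + 1)
--     w = max(0, x1 - x0 + 1)
--     h = max(0, y1 - y0 + 1)
--     return {(x0 + i // h, y0 + i % h) for i in range(w * h)}
-- ===== Notes on version B (the rewrite author's own statement) =====
-- stated objective: alternative
-- what changed: B first intersects the part's box with the grid rectangle to get clamped corner coordinates and sizes, then runs ONE flat loop over a single linear index i in range(w*h), decoding each cell as (x0 + i // h, y0 + i % h) with divmod arithmetic; A's nested dx/dy loops and the per-cell bounds test disappear.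
import Mathlib
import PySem

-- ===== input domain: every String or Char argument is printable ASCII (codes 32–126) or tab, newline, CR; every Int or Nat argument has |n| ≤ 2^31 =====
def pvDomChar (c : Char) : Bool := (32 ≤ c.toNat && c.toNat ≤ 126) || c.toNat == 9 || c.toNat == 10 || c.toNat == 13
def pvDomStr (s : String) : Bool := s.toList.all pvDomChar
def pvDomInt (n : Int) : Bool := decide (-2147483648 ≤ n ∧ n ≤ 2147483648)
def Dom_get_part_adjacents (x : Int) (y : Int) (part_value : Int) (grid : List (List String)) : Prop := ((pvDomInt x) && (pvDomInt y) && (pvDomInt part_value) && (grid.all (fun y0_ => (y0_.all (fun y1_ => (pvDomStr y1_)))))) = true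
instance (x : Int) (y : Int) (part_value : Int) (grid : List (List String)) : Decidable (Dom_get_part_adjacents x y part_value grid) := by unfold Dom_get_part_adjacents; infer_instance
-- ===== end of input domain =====

-- B intersects the box with the grid rectangle up front and then decodes a single flat linear
-- index with divmod, instead of nested dx/dy loops with a per-cell bounds test; objective: alternative.

-- ===== PORT A =====
def get_part_adjacents (x : Int) (y : Int) (part_value : Int) (grid : List (List String)) : List (Int × Int) :=
  match PySem.List.pyGet? grid 0 with
  | none => []   -- grid[0] raises IndexError in Python; excluded by Pre_
  | some row0 =>
    let part_length : Int := PySem.Str.len (PySem.Int.toStr part_value)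
    let max_x : Int := (row0.length : Int) - 1
    let max_y : Int := (grid.length : Int) - 1
    (PySem.List.pyRange (-1) (part_length + 1) 1).foldl (fun box dx =>
      ([-1, 0, 1] : List Int).foldl (fun box dy =>
        if 0 ≤ y + dy ∧ y + dy ≤ max_y ∧ 0 ≤ x + dx ∧ x + dx ≤ max_x
        then PySem.Set.add box (x + dx, y + dy) else box) box) PySem.Set.empty

-- ===== PORT B =====
def get_part_adjacents_alt (x : Int) (y : Int) (part_value : Int) (grid : List (List String)) : List (Int × Int) :=
  match PySem.List.pyGet? grid 0 with
  | none => []   -- grid[0] raises IndexError in Python; excluded by Pre_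
  | some row0 =>
    let x0 : Int := max 0 (x - 1)
    let x1 : Int := min ((row0.length : Int) - 1) (x + PySem.Str.len (PySem.Int.toStr part_value))
    let y0 : Int := max 0 (y - 1)
    let y1 : Int := min ((grid.length : Int) - 1) (y + 1)
    let w : Int := max 0 (x1 - x0 + 1)
    let h : Int := max 0 (y1 - y0 + 1)
    PySem.Set.ofList ((PySem.List.pyRange 0 (w * h) 1).map
      (fun i => (x0 + PySem.Int.floordiv i h, y0 + PySem.Int.mod i h)))

-- ===== PRECONDITION & SPEC =====
-- Pre_ excludes only the empty grid, on which Python A raises IndexError at grid[0].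
def Pre_get_part_adjacents (x : Int) (y : Int) (part_value : Int) (grid : List (List String)) : Prop := grid ≠ []
instance (x : Int) (y : Int) (part_value : Int) (grid : List (List String)) : Decidable (Pre_get_part_adjacents x y part_value grid) := by unfold Pre_get_part_adjacents; infer_instance
def pvWitness_get_part_adjacents : Int × Int × Int × List (List String) := (0, 0, 7, [["1", "2"], ["3", "4"]])

def Spec_get_part_adjacents (x : Int) (y : Int) (part_value : Int) (grid : List (List String)) (out : List (Int × Int)) : Prop := out = get_part_adjacents_alt x y part_value grid
instance (x : Int) (y : Int) (part_value : Int) (grid : List (List String)) (out : List (Int × Int)) : Decidable (Spec_get_part_adjacents x y part_value grid out) := by unfold Spec_get_part_adjacents; infer_instance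

-- ===== CLAIM (what is proved, stated in full; the proofs are below) =====
def Claim_equal_get_part_adjacents : Prop := ∀ (x : Int) (y : Int) (part_value : Int) (grid : List (List String)), Dom_get_part_adjacents x y part_value grid → Pre_get_part_adjacents x y part_value grid → Spec_get_part_adjacents x y part_value grid (get_part_adjacents x y part_value grid)

-- ===== LEMMAS AND PROOFS =====

-- a run of consecutive integers filtered by an interval is the clamped run
theorem pv_filter_pyRange (lo hi : Int) : ∀ (n : Nat) (a b : Int), b - a = (n : Int) →
    (PySem.List.pyRange a b 1).filter (fun c => decide (lo ≤ c ∧ c ≤ hi))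
      = PySem.List.pyRange (max a lo) (min (b - 1) hi + 1) 1 := by
  intro n
  induction n with
  | zero =>
    intro a b hab
    rw [PySem.List.pyRange_one_eq_nil (by omega), PySem.List.pyRange_one_eq_nil (by omega)]
    simp
  | succ k ih =>
    intro a b hab
    rw [PySem.List.pyRange_one_cons (by omega)]
    have ihk := ih (a + 1) b (by omega)
    by_cases hc : lo ≤ a ∧ a ≤ hi
    · have hm : a < min (b - 1) hi + 1 := by
        have h1 := le_min (show a ≤ b - 1 by omega) hc.2
        omega
      rw [List.filter_cons_of_pos (by simpa using hc), ihk,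
          max_eq_left hc.1, max_eq_left (show lo ≤ a + 1 by omega),
          PySem.List.pyRange_one_cons hm]
    · rw [List.filter_cons_of_neg (by simpa using hc), ihk]
      rcases not_and_or.mp hc with h | h
      · rw [not_le] at h
        rw [max_eq_right (le_of_lt h), max_eq_right (show a + 1 ≤ lo by omega)]
      · rw [not_le] at h
        have h1 := min_le_right (b - 1) hi
        have h2 := le_max_left (a + 1) lo
        have h3 := le_max_left a lo
        rw [PySem.List.pyRange_one_eq_nil (by omega), PySem.List.pyRange_one_eq_nil (by omega)]

-- pyRange shifts under translation
theorem pv_pyRange_shift (x a b : Int) :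
    (PySem.List.pyRange a b 1).map (fun c => x + c) = PySem.List.pyRange (x + a) (x + b) 1 := by
  rw [PySem.List.pyRange_one, PySem.List.pyRange_one]
  rw [show x + b - (x + a) = b - a by ring]
  simp only [List.map_map]
  exact List.map_congr_left (fun k _ => by simp [Function.comp]; ring)

-- foldl of Set.add over a nodup list disjoint from the accumulator is append
theorem pv_foldl_add {α : Type} [BEq α] [LawfulBEq α] : ∀ (xs : List α) (s : List α),
    xs.Nodup → (∀ a ∈ xs, a ∉ s) → xs.foldl PySem.Set.add s = s ++ xs := by
  intro xs
  induction xs with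
  | nil => intro s _ _; simp [List.foldl]
  | cons a t ih =>
    intro s hnd hdis
    simp only [List.foldl]
    rw [PySem.Set.add_of_not_mem (hdis a (by simp))]
    rw [ih (s ++ [a]) (List.Nodup.of_cons hnd)]
    · simp
    · intro b hb
      simp only [List.mem_append, List.mem_singleton]
      rintro (h | rfl)
      · exact hdis b (by simp [hb]) h
      · exact (List.nodup_cons.mp hnd).1 hb

theorem pv_ofList_nodup {α : Type} [BEq α] [LawfulBEq α] (xs : List α) (h : xs.Nodup) :
    PySem.Set.ofList xs = xs := by
  have := pv_foldl_add xs [] h (by simp)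
  simpa [PySem.Set.ofList_eq_foldl] using this

-- guarded Set.add loop = append of the filtered, mapped list (fresh, injective images)
theorem pv_foldl_add_if {α β : Type} [BEq β] [LawfulBEq β]
    (P : α → Prop) [DecidablePred P] (f : α → β) :
    ∀ (cs : List α) (box : List β),
      (∀ a ∈ cs, ∀ b ∈ cs, f a = f b → a = b) → cs.Nodup → (∀ c ∈ cs, f c ∉ box) →
      cs.foldl (fun bx c => if P c then PySem.Set.add bx (f c) else bx) box
        = box ++ (cs.filter (fun c => decide (P c))).map f := by
  intro cs
  induction cs with
  | nil => intro box _ _ _; simp [List.foldl]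
  | cons c t ih =>
    intro box hinj hnd hfresh
    simp only [List.foldl]
    by_cases hp : P c
    · rw [if_pos hp, PySem.Set.add_of_not_mem (hfresh c (by simp))]
      rw [ih (box ++ [f c])
          (fun a ha b hb => hinj a (by simp [ha]) b (by simp [hb]))
          (List.Nodup.of_cons hnd)]
      · rw [List.filter_cons_of_pos (by simpa using hp)]
        simp
      · intro c' hc'
        simp only [List.mem_append, List.mem_singleton]
        rintro (h | h)
        · exact hfresh c' (by simp [hc']) h
        · exact (List.nodup_cons.mp hnd).1
            (by rw [hinj c' (by simp [hc']) c (by simp) h] at hc'; exact hc')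
    · rw [if_neg hp, ih box (fun a ha b hb => hinj a (by simp [ha]) b (by simp [hb])) (List.Nodup.of_cons hnd)
          (fun c' hc' => hfresh c' (by simp [hc']))]
      rw [List.filter_cons_of_neg (by simpa using hp)]

-- flatMap of a guarded body = flatMap over the filtered list
theorem pv_flatMap_ite {α : Type} (P : α → Prop) [DecidablePred P] (h : α → List (α × α)) :
    ∀ m : List α, (m.flatMap (fun c => if P c then h c else []))
      = (m.filter (fun c => decide (P c))).flatMap h := by
  intro m
  induction m with
  | nil => simp
  | cons c t ih =>
    by_cases hp : P c
    · rw [List.flatMap_cons, if_pos hp, List.filter_cons_of_pos (by simpa using hp),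
        List.flatMap_cons, ih]
    · rw [List.flatMap_cons, if_neg hp, List.filter_cons_of_neg (by simpa using hp),
        List.nil_append, ih]

-- the inner dy-loop appends the clamped column of cells at x+dx (nothing if out of x-bounds)
theorem pv_inner (x y MX MY dx : Int) (box : List (Int × Int))
    (hbox : ∀ p ∈ box, p.1 ≠ x + dx) :
    ([-1, 0, 1] : List Int).foldl (fun box dy =>
        if 0 ≤ y + dy ∧ y + dy ≤ MY ∧ 0 ≤ x + dx ∧ x + dx ≤ MX
        then PySem.Set.add box (x + dx, y + dy) else box) box
      = box ++ (if 0 ≤ x + dx ∧ x + dx ≤ MX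
          then (PySem.List.pyRange (max 0 (y - 1)) (min MY (y + 1) + 1) 1).map
                 (fun cy => (x + dx, cy))
          else []) := by
  rw [pv_foldl_add_if (fun dy => 0 ≤ y + dy ∧ y + dy ≤ MY ∧ 0 ≤ x + dx ∧ x + dx ≤ MX)
      (fun dy => ((x + dx, y + dy) : Int × Int)) [-1, 0, 1] box
      (fun a _ b _ h => by simp only [Prod.mk.injEq] at h; omega)
      (by decide)
      (fun c _ hmem => hbox _ hmem rfl)]
  congr 1
  by_cases hx : 0 ≤ x + dx ∧ x + dx ≤ MX
  · rw [if_pos hx]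
    have h1 : (([-1, 0, 1] : List Int).filter
          (fun c => decide (0 ≤ y + c ∧ y + c ≤ MY ∧ 0 ≤ x + dx ∧ x + dx ≤ MX)))
        = ([-1, 0, 1] : List Int).filter ((fun c => decide (0 ≤ c ∧ c ≤ MY)) ∘ (fun c => y + c)) :=
      List.filter_congr (fun c _ => by simp [hx.1, hx.2])
    have h2 : (fun dy => ((x + dx, y + dy) : Int × Int))
        = (fun cy => ((x + dx, cy) : Int × Int)) ∘ (fun c => y + c) := rfl
    rw [h1, h2, ← List.map_map, ← List.filter_map,
        show ([-1, 0, 1] : List Int) = PySem.List.pyRange (-1) 2 1 from by decide,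
        pv_pyRange_shift y (-1) 2,
        show y + -1 = y - 1 by ring, show y + 2 = (y + 2) from rfl,
        pv_filter_pyRange 0 MY 3 (y - 1) (y + 2) (by omega),
        show y + 2 - 1 = y + 1 by ring, max_comm, min_comm]
  · rw [if_neg hx]
    have : (([-1, 0, 1] : List Int).filter
          (fun c => decide (0 ≤ y + c ∧ y + c ≤ MY ∧ 0 ≤ x + dx ∧ x + dx ≤ MX))) = [] := by
      rw [List.filter_eq_nil_iff]
      intro c _
      simp only [decide_eq_true_eq]
      tauto
    rw [this, List.map_nil]

theorem pv_outer (x y MX MY : Int) : ∀ (n : Nat) (b : Int), -1 ≤ b → b + 1 = (n : Int) →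
    (PySem.List.pyRange (-1) b 1).foldl (fun box dx =>
      ([-1, 0, 1] : List Int).foldl (fun box dy =>
        if 0 ≤ y + dy ∧ y + dy ≤ MY ∧ 0 ≤ x + dx ∧ x + dx ≤ MX
        then PySem.Set.add box (x + dx, y + dy) else box) box) []
      = (PySem.List.pyRange (-1) b 1).flatMap (fun dx =>
          if 0 ≤ x + dx ∧ x + dx ≤ MX
          then (PySem.List.pyRange (max 0 (y - 1)) (min MY (y + 1) + 1) 1).map
                 (fun cy => (x + dx, cy))
          else []) := by
  intro n
  induction n with
  | zero =>
    intro b h1 h2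
    rw [PySem.List.pyRange_one_eq_nil (by omega)]
    simp
  | succ m ih =>
    intro b h1 h2
    rw [show b = (b - 1) + 1 by ring, PySem.List.pyRange_one_succ_right (by omega),
        List.foldl_append, ih (b - 1) (by omega) (by omega), List.flatMap_append]
    have hfresh : ∀ p ∈ (PySem.List.pyRange (-1) (b - 1) 1).flatMap (fun dx =>
          if 0 ≤ x + dx ∧ x + dx ≤ MX
          then (PySem.List.pyRange (max 0 (y - 1)) (min MY (y + 1) + 1) 1).map
                 (fun cy => (x + dx, cy))
          else []), p.1 ≠ x + (b - 1) := by
      intro p hp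
      rw [List.mem_flatMap] at hp
      obtain ⟨dx', hdx', hpmem⟩ := hp
      have hlt := (PySem.List.mem_pyRange_one.mp hdx').2
      by_cases hc : 0 ≤ x + dx' ∧ x + dx' ≤ MX
      · rw [if_pos hc, List.mem_map] at hpmem
        obtain ⟨cy, _, rfl⟩ := hpmem
        simp only
        omega
      · rw [if_neg hc] at hpmem
        exact absurd hpmem (List.not_mem_nil)
    have hsingle : ∀ (init : List (Int × Int)),
        List.foldl (fun box dx =>
          ([-1, 0, 1] : List Int).foldl (fun box dy =>
            if 0 ≤ y + dy ∧ y + dy ≤ MY ∧ 0 ≤ x + dx ∧ x + dx ≤ MX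
            then PySem.Set.add box (x + dx, y + dy) else box) box) init [b - 1]
          = ([-1, 0, 1] : List Int).foldl (fun box dy =>
            if 0 ≤ y + dy ∧ y + dy ≤ MY ∧ 0 ≤ x + (b - 1) ∧ x + (b - 1) ≤ MX
            then PySem.Set.add box (x + (b - 1), y + dy) else box) init := fun init => rfl
    rw [hsingle, pv_inner x y MX MY (b - 1) _ hfresh]
    simp

theorem pv_bridge (x y MX MY L : Int) (hL : 0 ≤ L) :
    (PySem.List.pyRange (-1) (L + 1) 1).flatMap (fun dx =>
        if 0 ≤ x + dx ∧ x + dx ≤ MX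
        then (PySem.List.pyRange (max 0 (y - 1)) (min MY (y + 1) + 1) 1).map
               (fun cy => (x + dx, cy))
        else [])
      = (PySem.List.pyRange (max 0 (x - 1)) (min MX (x + L) + 1) 1).flatMap
          (fun cx => (PySem.List.pyRange (max 0 (y - 1)) (min MY (y + 1) + 1) 1).map
                       (fun cy => (cx, cy))) := by
  rw [pv_flatMap_ite (fun dx => 0 ≤ x + dx ∧ x + dx ≤ MX)
        (fun dx => (PySem.List.pyRange (max 0 (y - 1)) (min MY (y + 1) + 1) 1).map
          (fun cy => ((x + dx, cy) : Int × Int))) _,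
      ← List.flatMap_map (fun c => x + c)
        (fun cx => (PySem.List.pyRange (max 0 (y - 1)) (min MY (y + 1) + 1) 1).map
          (fun cy => ((cx, cy) : Int × Int))),
      show (fun c => decide (0 ≤ x + c ∧ x + c ≤ MX))
        = ((fun c => decide (0 ≤ c ∧ c ≤ MX)) ∘ (fun c => x + c)) from rfl,
      ← List.filter_map, pv_pyRange_shift x (-1) (L + 1),
      show x + -1 = x - 1 by ring,
      pv_filter_pyRange 0 MX (L + 2).toNat (x - 1) (x + (L + 1)) (by omega),
      show x + (L + 1) - 1 = x + L by ring]
  simp only [max_comm (x - 1) 0, min_comm (x + L) MX]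

-- decoding a flat linear index with divmod enumerates the product column-major
theorem pv_decode (y0 h : Int) (hh : 0 < h) : ∀ (n : Nat) (x0 : Int),
    (PySem.List.pyRange 0 ((n : Int) * h) 1).map
        (fun i => ((x0 + PySem.Int.floordiv i h, y0 + PySem.Int.mod i h) : Int × Int))
      = (PySem.List.pyRange x0 (x0 + (n : Int)) 1).flatMap
          (fun cx => (PySem.List.pyRange y0 (y0 + h) 1).map (fun cy => (cx, cy))) := by
  intro n
  induction n with
  | zero =>
    intro x0
    rw [show ((0 : Nat) : Int) * h = 0 by ring]
    rw [PySem.List.pyRange_one_eq_nil (le_refl 0),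
        PySem.List.pyRange_one_eq_nil (show x0 + ((0 : Nat) : Int) ≤ x0 by omega)]
    simp
  | succ m ih =>
    intro x0
    have hmh : (0 : Int) ≤ (m : Int) * h := by positivity
    rw [show (((m + 1 : Nat)) : Int) * h = (m : Int) * h + h by push_cast; ring,
        PySem.List.pyRange_one_append 0 ((m : Int) * h) ((m : Int) * h + h) hmh (by omega),
        List.map_append, ih x0,
        show x0 + ((m + 1 : Nat) : Int) = (x0 + (m : Int)) + 1 by push_cast; ring,
        PySem.List.pyRange_one_succ_right (by omega),
        List.flatMap_append]
    congr 1
    have hsp : PySem.List.pyRange ((m : Int) * h) ((m : Int) * h + h) 1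
        = (PySem.List.pyRange 0 h 1).map (fun c => (m : Int) * h + c) := by
      have hs := pv_pyRange_shift ((m : Int) * h) 0 h
      rw [add_zero] at hs
      exact hs.symm
    rw [hsp, List.map_map]
    have hdec : ∀ j ∈ PySem.List.pyRange 0 h 1,
        (((fun i => ((x0 + PySem.Int.floordiv i h, y0 + PySem.Int.mod i h) : Int × Int)) ∘
          (fun c => (m : Int) * h + c)) j)
          = (((x0 + (m : Int), y0 + j)) : Int × Int) := by
      intro j hj
      obtain ⟨hj0, hjh⟩ := PySem.List.mem_pyRange_one.mp hj
      have hfd : PySem.Int.floordiv ((m : Int) * h + j) h = (m : Int) := by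
        rw [PySem.Int.floordiv_eq_iff_of_pos hh]
        constructor <;> nlinarith
      have hmod : PySem.Int.mod ((m : Int) * h + j) h = j := by
        have := PySem.Int.floordiv_mul_add_mod ((m : Int) * h + j) h
        rw [hfd] at this
        omega
      simp [Function.comp, hfd, hmod]
    rw [List.map_congr_left hdec, List.flatMap_cons, List.flatMap_nil, List.append_nil]
    rw [show (fun j => (((x0 + (m : Int), y0 + j)) : Int × Int))
          = ((fun cy => ((x0 + (m : Int), cy) : Int × Int)) ∘ (fun c => y0 + c)) from rfl,
        ← List.map_map, pv_pyRange_shift y0 0 h, add_zero]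

-- ===== VERDICT (by name: the statement is the Claim_ definition above) =====
theorem get_part_adjacents_spec : Claim_equal_get_part_adjacents := by
  intro x y part_value grid _hdom hpre
  unfold Spec_get_part_adjacents
  cases grid with
  | nil => exact absurd rfl hpre
  | cons row0 rest =>
    have hget : PySem.List.pyGet? (row0 :: rest) 0 = some row0 := by
      simp [PySem.List.pyGet?, PySem.List.pyIdx?]
    rw [get_part_adjacents, get_part_adjacents_alt, hget]
    simp only
    set L := PySem.Str.len (PySem.Int.toStr part_value) with hLdef
    set MX := ((row0.length : Int) - 1) with hMX
    set MY := (((row0 :: rest).length : Int) - 1) with hMY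
    have hL : 0 ≤ L := by rw [hLdef]; simp [PySem.Str.len_eq]
    rw [show (PySem.Set.empty : List (Int × Int)) = [] from rfl]
    rw [pv_outer x y MX MY (L + 2).toNat (L + 1) (by omega) (by omega),
        pv_bridge x y MX MY L hL]
    -- align B's clamped corners with A's clamped ranges
    set x0 := max 0 (x - 1) with hx0
    set x1 := min MX (x + L) with hx1
    set y0 := max 0 (y - 1) with hy0
    set y1 := min MY (y + 1) with hy1
    by_cases hh : 0 < y1 - y0 + 1
    · have hhmax : max 0 (y1 - y0 + 1) = y1 - y0 + 1 := max_eq_right (by omega)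
      by_cases hw : 0 < x1 - x0 + 1
      · have hwmax : max 0 (x1 - x0 + 1) = x1 - x0 + 1 := max_eq_right (by omega)
        have hdec := pv_decode y0 (y1 - y0 + 1) hh (x1 - x0 + 1).toNat x0
        rw [hwmax, hhmax,
            show ((x1 - x0 + 1).toNat : Int) = x1 - x0 + 1 from by omega] at *
        rw [show x1 + 1 = x0 + (x1 - x0 + 1) by ring,
            show y1 + 1 = y0 + (y1 - y0 + 1) by ring, ← hdec]
        exact (pv_ofList_nodup _ ((PySem.List.nodup_pyRange_one _ _).map
          (fun a b hab => by
            have h1 := congrArg Prod.fst hab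
            have h2 := congrArg Prod.snd hab
            simp only at h1 h2
            have hfm := PySem.Int.floordiv_mul_add_mod a (y1 - y0 + 1)
            have hfm' := PySem.Int.floordiv_mul_add_mod b (y1 - y0 + 1)
            nlinarith [hfm, hfm']))).symm
      · have hwmax : max 0 (x1 - x0 + 1) = 0 := max_eq_left (by omega)
        rw [hwmax, zero_mul, PySem.List.pyRange_one_eq_nil (le_refl 0),
            PySem.List.pyRange_one_eq_nil (show x1 + 1 ≤ x0 by omega)]
        simp [PySem.Set.ofList]
    · have hhmax : max 0 (y1 - y0 + 1) = 0 := max_eq_left (by omega)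
      rw [hhmax, mul_zero, PySem.List.pyRange_one_eq_nil (le_refl 0),
          PySem.List.pyRange_one_eq_nil (show y1 + 1 ≤ y0 by omega)]
      simp [PySem.Set.ofList]
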